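-- pv_equiv track=rewrite | github.com/mico3531/AtCoder_ABC | 416_d.py | solve
-- ===== SOURCE A (Python) =====
-- def solve(N, M, A, B):
--     A.sort()
--     B.sort()
--     L = 0
--     R = N-1
--     ret = 0
--     for i in range(N):
--         if A[i] + B[R] >= M:
--             ret += A[i] + B[R] - M
--             R -= 1
--         else:
--             ret += A[i] + B[L]
--             L += 1
--     return ret
-- ===== SOURCE B (Python) =====
-- def solve(N, M, A, B):
--     A.sort()
--     B.sort()
--
--     def feasible(k):
--         # can the k largest of A (ascending) pair with the k largest of B
--         # (descending) so that every pair sums to at least M?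
--         return all(A[N - k + i] + B[N - 1 - i] >= M for i in range(k))
--
--     # binary search the largest feasible k (feasible is downward closed)
--     lo, hi = 0, N + 1
--     while hi - lo > 1:
--         mid = (lo + hi) // 2
--         if feasible(mid):
--             lo = mid
--         else:
--             hi = mid
--     return sum(A[i] + B[i] for i in range(N)) - M * lo
-- ===== Notes on version B (the rewrite author's own statement) =====
-- stated objective: alternative
-- what changed: B never runs A's greedy two-pointer scan: it characterises the optimum by a closed feasibility predicate (the k largest of A paired against the k largest of B reversed all reach M), binary-searches the largest feasible k, and returns sum(A[:N])+sum(B[:N]) - M*k.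
import Mathlib
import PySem

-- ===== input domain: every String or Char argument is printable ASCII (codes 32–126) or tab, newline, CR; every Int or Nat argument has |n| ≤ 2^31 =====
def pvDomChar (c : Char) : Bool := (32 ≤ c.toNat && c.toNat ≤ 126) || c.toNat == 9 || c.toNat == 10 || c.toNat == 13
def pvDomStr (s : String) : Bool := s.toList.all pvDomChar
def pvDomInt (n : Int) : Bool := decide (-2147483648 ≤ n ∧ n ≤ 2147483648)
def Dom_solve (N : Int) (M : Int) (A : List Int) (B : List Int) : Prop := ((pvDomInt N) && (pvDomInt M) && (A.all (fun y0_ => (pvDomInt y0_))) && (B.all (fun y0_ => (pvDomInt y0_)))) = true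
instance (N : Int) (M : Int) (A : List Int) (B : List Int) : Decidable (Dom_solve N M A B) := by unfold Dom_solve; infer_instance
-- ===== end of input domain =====

-- B abandons A's greedy two-pointer scan: it binary-searches the largest k for which the k
-- largest of A pair with the k largest of B (reversed) all reaching M, and returns
-- sum(A[:N])+sum(B[:N]) - M*k (objective: alternative algorithm, same cost).
-- Both, like the Python, sort A and B in place; the equivalence proved is about the return value.

-- ===== PORT A =====
-- one loop step of A: state (L, R, ret)
def pvStepA (M : Int) (As Bs : List Int) (st : Int × Int × Int) (i : Int) : Int × Int × Int :=
  if PySem.List.pyGetD As i 0 + PySem.List.pyGetD Bs st.2.1 0 ≥ M then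
    (st.1, st.2.1 - 1, st.2.2 + PySem.List.pyGetD As i 0 + PySem.List.pyGetD Bs st.2.1 0 - M)
  else
    (st.1 + 1, st.2.1, st.2.2 + PySem.List.pyGetD As i 0 + PySem.List.pyGetD Bs st.1 0)

def solve (N : Int) (M : Int) (A : List Int) (B : List Int) : Int :=
  ((PySem.List.pyRange 0 N 1).foldl
    (pvStepA M (PySem.List.sorted A (fun x => x) false) (PySem.List.sorted B (fun x => x) false))
    (0, N - 1, 0)).2.2

-- ===== PORT B =====
-- Source B's feasible(k): all(A[N-k+i] + B[N-1-i] >= M for i in range(k))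
def pvFeasible (N M : Int) (As Bs : List Int) (k : Int) : Bool :=
  (PySem.List.pyRange 0 k 1).all
    (fun i => decide (PySem.List.pyGetD As (N - k + i) 0 + PySem.List.pyGetD Bs (N - 1 - i) 0 ≥ M))

-- Source B's while loop: binary search for the largest feasible k; returns lo
def pvLoop (N M : Int) (As Bs : List Int) (lo hi : Int) : Int :=
  if h : hi - lo > 1 then
    if pvFeasible N M As Bs (PySem.Int.floordiv (lo + hi) 2)
    then pvLoop N M As Bs (PySem.Int.floordiv (lo + hi) 2) hi
    else pvLoop N M As Bs lo (PySem.Int.floordiv (lo + hi) 2)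
  else lo
termination_by (hi - lo).toNat
decreasing_by
  all_goals rw [PySem.Int.floordiv_eq_ediv_of_pos (by omega : (0:Int) < 2)]; omega

def solve_alt (N : Int) (M : Int) (A : List Int) (B : List Int) : Int :=
  ((PySem.List.pyRange 0 N 1).foldl
      (fun t i => t + (PySem.List.pyGetD (PySem.List.sorted A (fun x => x) false) i 0
                        + PySem.List.pyGetD (PySem.List.sorted B (fun x => x) false) i 0)) 0)
    - M * pvLoop N M (PySem.List.sorted A (fun x => x) false)
                     (PySem.List.sorted B (fun x => x) false) 0 (N + 1)

-- ===== PRECONDITION & SPEC =====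
-- Exactly the inputs on which the Python A returns: for N > 0 it indexes A[i] (i < N) and
-- B[L], B[R] (all in [0, N-1]), raising IndexError iff N exceeds a list length; for N ≤ 0
-- the loop is empty and A returns 0.
def Pre_solve (N : Int) (M : Int) (A : List Int) (B : List Int) : Prop :=
  N ≤ 0 ∨ (N ≤ (A.length : Int) ∧ N ≤ (B.length : Int))
instance (N : Int) (M : Int) (A : List Int) (B : List Int) : Decidable (Pre_solve N M A B) := by unfold Pre_solve; infer_instance

def pvWitness_solve : Int × Int × List Int × List Int := (3, 5, [1, 4, 2], [3, 1, 6])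

def Spec_solve (N : Int) (M : Int) (A : List Int) (B : List Int) (out : Int) : Prop := out = solve_alt N M A B
instance (N : Int) (M : Int) (A : List Int) (B : List Int) (out : Int) : Decidable (Spec_solve N M A B out) := by unfold Spec_solve; infer_instance

-- ===== CLAIM (what is proved, stated in full; the proofs are below) =====
def Claim_equal_solve : Prop := ∀ (N : Int) (M : Int) (A : List Int) (B : List Int), Dom_solve N M A B → Pre_solve N M A B → Spec_solve N M A B (solve N M A B)

-- ===== LEMMAS AND PROOFS =====

-- proof-side abbreviation for the (in-range under Pre_) indexings
def pvG (xs : List Int) (i : Int) : Int := PySem.List.pyGetD xs i 0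

-- A's hit count after t steps, as a Nat
def pvKap (N M : Int) (As Bs : List Int) : Nat → Nat
  | 0 => 0
  | t + 1 => if pvG As t + pvG Bs (N - 1 - (pvKap N M As Bs t : Int)) ≥ M
             then pvKap N M As Bs t + 1 else pvKap N M As Bs t

theorem pvKap_le (N M : Int) (As Bs : List Int) : ∀ t : Nat, pvKap N M As Bs t ≤ t := by
  intro t
  induction t with
  | zero => simp [pvKap]
  | succ t ih => unfold pvKap; split <;> omega

-- A's invariant value after t steps
def pvRet (N M : Int) (As Bs : List Int) (t : Nat) : Int :=
  (∑ j ∈ Finset.range t, pvG As j)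
  + (∑ j ∈ Finset.range (t - pvKap N M As Bs t), pvG Bs j)
  + (∑ h ∈ Finset.range (pvKap N M As Bs t), pvG Bs (N - 1 - (h : Int)))
  - M * (pvKap N M As Bs t : Int)

theorem pv_foldT (As Bs : List Int) (t : Nat) :
    (PySem.List.pyRange 0 (t : Int) 1).foldl (fun t i => t + (pvG As i + pvG Bs i)) 0 =
      (∑ j ∈ Finset.range t, pvG As j) + (∑ j ∈ Finset.range t, pvG Bs j) := by
  induction t with
  | zero => simp [PySem.List.pyRange_zero_nat]
  | succ t ih =>
      rw [show ((t + 1 : Nat) : Int) = (t : Int) + 1 by push_cast; ring,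
          PySem.List.pyRange_one_succ_right (by positivity), List.foldl_append]
      simp only [List.foldl, ih, Finset.sum_range_succ]
      ring

theorem pvKap_succ (N M : Int) (As Bs : List Int) (t : Nat) :
    pvKap N M As Bs (t + 1) =
      if pvG As (t : Int) + pvG Bs (N - 1 - (pvKap N M As Bs t : Int)) ≥ M
      then pvKap N M As Bs t + 1 else pvKap N M As Bs t := rfl

theorem pv_foldA (N M : Int) (As Bs : List Int) (t : Nat) :
    (PySem.List.pyRange 0 (t : Int) 1).foldl (pvStepA M As Bs) (0, N - 1, 0) =
      (((t - pvKap N M As Bs t : Nat) : Int), N - 1 - (pvKap N M As Bs t : Int),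
        pvRet N M As Bs t) := by
  induction t with
  | zero => simp [pvKap, pvRet]
  | succ t ih =>
      have hk := pvKap_le N M As Bs t
      rw [show ((t + 1 : Nat) : Int) = (t : Int) + 1 by push_cast; ring,
          PySem.List.pyRange_one_succ_right (by positivity), List.foldl_append,
          List.foldl_cons, List.foldl_nil, ih]
      simp only [pvRet, pvKap_succ]
      by_cases hc : pvG As (t : Int) + pvG Bs (N - 1 - (pvKap N M As Bs t : Int)) ≥ M
      · rw [if_pos hc]
        simp only [pvStepA, pvG] at hc ⊢
        rw [if_pos hc]
        refine Prod.ext ?_ (Prod.ext ?_ ?_)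
        · simp only; omega
        · simp only; push_cast; ring
        · simp only
          rw [Finset.sum_range_succ (fun j => PySem.List.pyGetD As (j : Int) 0) t,
              Finset.sum_range_succ (fun h => PySem.List.pyGetD Bs (N - 1 - (h : Int)) 0)
                (pvKap N M As Bs t),
              show (t + 1) - (pvKap N M As Bs t + 1) = t - pvKap N M As Bs t by omega]
          push_cast
          ring
      · rw [if_neg hc]
        simp only [pvStepA, pvG] at hc ⊢
        rw [if_neg hc]
        refine Prod.ext ?_ (Prod.ext ?_ ?_)
        · simp only; omega
        · rfl
        · simp only
          rw [Finset.sum_range_succ (fun j => PySem.List.pyGetD As (j : Int) 0) t,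
              show (t + 1) - pvKap N M As Bs t = (t - pvKap N M As Bs t) + 1 by omega,
              Finset.sum_range_succ (fun j => PySem.List.pyGetD Bs (j : Int) 0)
                (t - pvKap N M As Bs t)]
          push_cast [hk]
          ring

-- the B-indices used by A, {0..t-k-1} ∪ {n-k..n-1} reindexed, partition {0..n-1} at t = n
theorem pv_partition (Bs : List Int) (n : Nat) :
    ∀ k : Nat, k ≤ n →
      (∑ j ∈ Finset.range (n - k), pvG Bs j)
        + (∑ h ∈ Finset.range k, pvG Bs ((n : Int) - 1 - (h : Int)))
      = ∑ j ∈ Finset.range n, pvG Bs j := by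
  intro k
  induction k with
  | zero => simp
  | succ k ih =>
      intro hk
      rw [Finset.sum_range_succ (fun h => pvG Bs ((n : Int) - 1 - (h : Int))) k]
      have h1 : n - k = (n - (k + 1)) + 1 := by omega
      have h2 : ((n : Int) - 1 - (k : Int)) = (((n - (k + 1) : Nat)) : Int) := by push_cast; omega
      calc (∑ j ∈ Finset.range (n - (k + 1)), pvG Bs j)
            + ((∑ h ∈ Finset.range k, pvG Bs ((n : Int) - 1 - (h : Int))) + pvG Bs ((n : Int) - 1 - (k : Int)))
          = ((∑ j ∈ Finset.range (n - (k + 1)), pvG Bs j) + pvG Bs (((n - (k + 1) : Nat) : Int)))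
            + (∑ h ∈ Finset.range k, pvG Bs ((n : Int) - 1 - (h : Int))) := by rw [h2]; ring
        _ = (∑ j ∈ Finset.range (n - k), pvG Bs j)
            + (∑ h ∈ Finset.range k, pvG Bs ((n : Int) - 1 - (h : Int))) := by
              rw [h1, Finset.sum_range_succ (fun j => pvG Bs (j : Int)) (n - (k + 1))]
        _ = ∑ j ∈ Finset.range n, pvG Bs j := ih (by omega)

-- ---------- B side: feasibility characterisation of the greedy count ----------

-- pyGetD is monotone in the index on a sorted list (in-range indices)
theorem pvG_mono (As : List Int) (hs : As.Pairwise (· ≤ ·)) (i j : Int)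
    (h0 : 0 ≤ i) (hij : i ≤ j) (hj : j < (As.length : Int)) : pvG As i ≤ pvG As j := by
  have hi' : i.toNat < As.length := by omega
  have hj' : j.toNat < As.length := by omega
  rw [pvG, pvG, PySem.List.pyGetD_eq_getElem As (i := i) 0 (by omega) (by omega),
      PySem.List.pyGetD_eq_getElem As (i := j) 0 (by omega) (by omega)]
  rcases eq_or_lt_of_le (show i.toNat ≤ j.toNat by omega) with h | h
  · simp [h]
  · exact (List.pairwise_iff_getElem.mp hs) i.toNat j.toNat hi' hj' h

-- the Prop form of Source B's feasible(m)
def pvFeas (n : Nat) (M : Int) (As Bs : List Int) (m : Nat) : Prop :=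
  ∀ j : Nat, j < m → M ≤ pvG As ((n : Int) - m + j) + pvG Bs ((n : Int) - 1 - j)

theorem pvFeasible_iff (n : Nat) (M : Int) (As Bs : List Int) (m : Nat) :
    pvFeasible (n : Int) M As Bs (m : Int) = true ↔ pvFeas n M As Bs m := by
  unfold pvFeasible pvFeas
  rw [List.all_eq_true]
  constructor
  · intro h j hj
    have := h (j : Int) (by rw [PySem.List.mem_pyRange_one]; constructor <;> [positivity; exact_mod_cast hj])
    simpa [pvG, ge_iff_le] using this
  · intro h i hi
    rw [PySem.List.mem_pyRange_one] at hi
    have hj : i.toNat < m := by omega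
    have := h i.toNat hj
    have hcast : ((i.toNat : Nat) : Int) = i := by omega
    rw [hcast] at this
    simpa [pvG, ge_iff_le] using this

-- ACHIEVABILITY: the greedy count is feasible (uses sortedness of As only)
theorem pv_ach (n : Nat) (M : Int) (As Bs : List Int) (hs : As.Pairwise (· ≤ ·))
    (hA : n ≤ As.length) :
    ∀ t : Nat, t ≤ n → ∀ j : Nat, j < pvKap n M As Bs t →
      M ≤ pvG As ((t : Int) - pvKap n M As Bs t + j) + pvG Bs ((n : Int) - 1 - j) := by
  intro t
  induction t with
  | zero => intro _ j hj; simp [pvKap] at hj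
  | succ t ih =>
      intro ht j hj
      have hk := pvKap_le n M As Bs t
      rw [pvKap_succ] at hj ⊢
      by_cases hc : pvG As (t : Int) + pvG Bs ((n : Int) - 1 - (pvKap n M As Bs t : Int)) ≥ M
      · rw [if_pos hc] at hj ⊢
        rcases Nat.lt_succ_iff_lt_or_eq.mp hj with hlt | rfl
        · have := ih (by omega) j hlt
          have hidx : ((t : Int) + 1) - ((pvKap n M As Bs t : Int) + 1) + j
              = (t : Int) - pvKap n M As Bs t + j := by push_cast; ring
          rw [show ((t + 1 : Nat) : Int) = (t : Int) + 1 by push_cast; ring]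
          push_cast
          calc M ≤ pvG As ((t : Int) - pvKap n M As Bs t + j) + pvG Bs ((n : Int) - 1 - j) := this
            _ = _ := by rw [show (t : Int) + 1 - ((pvKap n M As Bs t : Int) + 1) + j
                              = (t : Int) - pvKap n M As Bs t + j by ring]
        · rw [show ((t + 1 : Nat) : Int) = (t : Int) + 1 by push_cast; ring]
          push_cast
          rw [show (t : Int) + 1 - ((pvKap n M As Bs t : Int) + 1) + (pvKap n M As Bs t : Int)
                = (t : Int) by ring]
          exact hc
      · rw [if_neg hc] at hj ⊢
        have := ih (by omega) j hj
        have hmono : pvG As ((t : Int) - pvKap n M As Bs t + j)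
            ≤ pvG As (((t + 1 : Nat) : Int) - pvKap n M As Bs t + j) := by
          apply pvG_mono As hs _ _ (by omega) (by push_cast; omega)
          push_cast
          omega
        omega

-- OPTIMALITY: any feasible m is at most the greedy count (no sortedness needed)
theorem pv_opt (n : Nat) (M : Int) (As Bs : List Int) (m : Nat) (hm : m ≤ n)
    (hf : pvFeas n M As Bs m) : m ≤ pvKap n M As Bs n := by
  have key : ∀ t : Nat, t ≤ n → t - (n - m) ≤ pvKap n M As Bs t := by
    intro t
    induction t with
    | zero => simp
    | succ t ih =>
        intro ht
        have hk := pvKap_le n M As Bs t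
        have ih' := ih (by omega)
        rw [pvKap_succ]
        by_cases hle : t + 1 ≤ n - m
        · split <;> omega
        · by_cases hgt : t - (n - m) < pvKap n M As Bs t
          · split <;> omega
          · -- pvKap t = t - (n - m), and t ≥ n - m: the greedy must hit at step t
            have hkap : pvKap n M As Bs t = t - (n - m) := by omega
            have hjlt : t - (n - m) < m := by omega
            have := hf (t - (n - m)) hjlt
            have hidx : ((n : Int) - m + (t - (n - m) : Nat)) = (t : Int) := by
              push_cast; omega
            rw [hidx] at this
            rw [if_pos (by rw [hkap]; exact this)]
            omega
  have := key n (le_refl n)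
  omega

-- DOWNWARD CLOSURE of feasibility (uses sortedness of As)
theorem pv_feas_mono (n : Nat) (M : Int) (As Bs : List Int) (hs : As.Pairwise (· ≤ ·))
    (hA : n ≤ As.length) (m m' : Nat) (hm : m ≤ n) (hm' : m' ≤ m)
    (hf : pvFeas n M As Bs m) : pvFeas n M As Bs m' := by
  intro j hj
  have h1 := hf j (by omega)
  have h2 : pvG As ((n : Int) - m + j) ≤ pvG As ((n : Int) - m' + j) := by
    apply pvG_mono As hs _ _ (by omega) (by omega) (by push_cast; omega)
  omega

-- the binary search returns exactly the greedy count
theorem pvLoop_eq (n : Nat) (M : Int) (As Bs : List Int) (hs : As.Pairwise (· ≤ ·))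
    (hA : n ≤ As.length) :
    ∀ d : Nat, ∀ lo hi : Int, (hi - lo).toNat ≤ d →
      0 ≤ lo → lo ≤ (pvKap n M As Bs n : Int) → (pvKap n M As Bs n : Int) < hi →
      hi ≤ (n : Int) + 1 →
      pvLoop (n : Int) M As Bs lo hi = (pvKap n M As Bs n : Int) := by
  intro d
  induction d with
  | zero => intro lo hi hd h0 hlo hhi hn; rw [pvLoop]; rw [dif_neg (by omega)]; omega
  | succ d ih =>
      intro lo hi hd h0 hlo hhi hn
      rw [pvLoop]
      by_cases hgap : hi - lo > 1
      · rw [dif_pos hgap]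
        have hm2 : PySem.Int.floordiv (lo + hi) 2 = (lo + hi) / 2 :=
          PySem.Int.floordiv_eq_ediv_of_pos (by omega)
        have hmlo : lo < PySem.Int.floordiv (lo + hi) 2 := by rw [hm2]; omega
        have hmhi : PySem.Int.floordiv (lo + hi) 2 < hi := by rw [hm2]; omega
        set mid := PySem.Int.floordiv (lo + hi) 2 with hmid
        have hmn : mid ≤ (n : Int) := by omega
        have hcast : ((mid.toNat : Nat) : Int) = mid := by omega
        by_cases hfe : pvFeasible (n : Int) M As Bs mid = true
        · rw [if_pos hfe]
          have hfeas : pvFeas n M As Bs mid.toNat := by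
            rw [← pvFeasible_iff, hcast]; exact hfe
          have hle : mid ≤ (pvKap n M As Bs n : Int) := by
            have := pv_opt n M As Bs mid.toNat (by omega) hfeas
            omega
          exact ih mid hi (by omega) (by omega) hle hhi hn
        · rw [if_neg hfe]
          have hlt : (pvKap n M As Bs n : Int) < mid := by
            by_contra hcon
            push_neg at hcon
            apply hfe
            rw [← hcast, pvFeasible_iff]
            exact pv_feas_mono n M As Bs hs hA (pvKap n M As Bs n) mid.toNat
              (pvKap_le n M As Bs n) (by omega)
              (pv_ach n M As Bs hs hA n (le_refl n))
          exact ih lo mid (by omega) h0 hlo hlt (by omega)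
      · rw [dif_neg hgap]; omega

-- the ports agree on every input satisfying Pre_
theorem pv_main (N M : Int) (A B : List Int) (hpre : Pre_solve N M A B) :
    solve N M A B = solve_alt N M A B := by
  unfold solve solve_alt
  by_cases hN : 0 ≤ N
  · obtain ⟨n, rfl⟩ : ∃ n : Nat, N = (n : Int) := ⟨N.toNat, by omega⟩
    set As := PySem.List.sorted A (fun x => x) false with hAs
    set Bs := PySem.List.sorted B (fun x => x) false with hBs
    have hs : As.Pairwise (· ≤ ·) := PySem.List.sorted_pairwise A (fun x => x) 
    have hA : n ≤ As.length := by
      rw [hAs, PySem.List.length_sorted]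
      rcases hpre with h | ⟨h, _⟩ <;> omega
    have hloop : pvLoop (n : Int) M As Bs 0 ((n : Int) + 1) = (pvKap n M As Bs n : Int) := by
      apply pvLoop_eq n M As Bs hs hA (n + 1) 0 ((n : Int) + 1) (by omega) (by omega)
        (by positivity) _ (by omega)
      have := pvKap_le n M As Bs n
      omega
    rw [hloop, pv_foldA ((n : Nat) : Int) M As Bs n]
    have hT := pv_foldT As Bs n
    simp only [pvG] at hT
    rw [hT]
    simp only [pvRet]
    rw [add_assoc, pv_partition Bs n (pvKap (n : Int) M As Bs n) (pvKap_le (n : Int) M As Bs n)]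
    simp only [pvG]
  · rw [PySem.List.pyRange_one_eq_nil (by omega), List.foldl_nil, List.foldl_nil]
    rw [pvLoop, dif_neg (by omega)]
    ring

-- ===== VERDICT (by name: the statement is the Claim_ definition above) =====
theorem solve_spec : Claim_equal_solve := by
  intro N M A B _ hpre
  unfold Spec_solve
  exact pv_main N M A B hpre
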